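-- pv_equiv track=rewrite | github.com/VRAXION/VRAXION | Golden Draft/tools/mitosis_meta_from_eval.py | best_circular_window_start
-- ===== SOURCE A (Python) =====
-- from typing import Any, Mapping, MutableMapping, Sequence
--
-- def best_circular_window_start(values: Sequence[int], window: int) -> tuple[int, int]:
--     """Return (best_start, best_sum) for a circular window sum.
--
--     Tie-break: smallest start index.
--     """
--
--     L = len(values)
--     if L <= 0:
--         raise ValueError("values must be non-empty")
--     if window <= 0 or window > L:
--         raise ValueError(f"window must be in [1, {L}], got {window}")
--
--     doubled = list(values) + list(values)
--     prefix = [0]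
--     for v in doubled:
--         prefix.append(prefix[-1] + int(v))
--
--     best_sum = None
--     best_start = 0
--     for start in range(L):
--         cur = prefix[start + window] - prefix[start]
--         if best_sum is None or cur > best_sum:
--             best_sum = cur
--             best_start = start
--     return best_start, int(best_sum or 0)
-- ===== SOURCE B (Python) =====
-- def best_circular_window_start(values, window):
--     """Return (best_start, best_sum) for a circular window sum.
--
--     Tie-break: smallest start index. Rolling-sum single pass instead of a
--     doubled prefix-sum table (O(1) extra space).
--     """
--     L = len(values)
--     if L <= 0:
--         raise ValueError("values must be non-empty")
--     if window <= 0 or window > L: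
--         raise ValueError(f"window must be in [1, {L}], got {window}")
--
--     cur = sum(int(values[i]) for i in range(window))
--     best_sum = cur
--     best_start = 0
--     for start in range(1, L):
--         cur += int(values[(start + window - 1) % L]) - int(values[start - 1])
--         if cur > best_sum:
--             best_sum = cur
--             best_start = start
--     return best_start, best_sum
-- ===== Notes on version B (the rewrite author's own statement) =====
-- stated objective: alternative
-- what changed: Replaces the doubled-list prefix-sum table (2L-element copy plus 2L+1 prefix entries, window sums as prefix differences) with a single-pass rolling window total updated in O(1) per start; O(1) extra space instead of O(L).
import Mathlib
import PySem

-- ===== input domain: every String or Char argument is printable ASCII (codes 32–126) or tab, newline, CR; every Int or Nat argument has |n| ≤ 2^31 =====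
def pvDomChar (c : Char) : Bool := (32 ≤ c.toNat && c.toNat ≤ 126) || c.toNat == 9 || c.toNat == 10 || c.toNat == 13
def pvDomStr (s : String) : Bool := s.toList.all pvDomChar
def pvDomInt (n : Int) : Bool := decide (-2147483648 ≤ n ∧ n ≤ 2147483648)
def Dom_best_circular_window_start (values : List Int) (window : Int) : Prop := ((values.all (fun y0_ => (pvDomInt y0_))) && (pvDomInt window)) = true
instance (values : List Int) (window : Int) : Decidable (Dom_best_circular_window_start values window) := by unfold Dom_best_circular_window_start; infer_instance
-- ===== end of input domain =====

-- B replaces A's doubled-list prefix-sum table with a single-pass rolling window total (O(1) extra space instead of O(L); same asymptotic time).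


-- ===== PORT A =====
-- Literal port of A: doubled list, prefix-sum table built by appending, scan of all L starts.
-- (window.toNat is taken only under the guard 1 ≤ window ≤ L, so it is the exact Python value.)
def best_circular_window_start (values : List Int) (window : Int) : Int × Int :=
  let L : Int := values.length
  if L ≤ 0 then (0, 0)          -- Python raises ValueError here (outside Pre_)
  else if window ≤ 0 ∨ window > L then (0, 0)   -- Python raises ValueError here (outside Pre_)
  else
    let doubled := values ++ values
    let prefixL := doubled.foldl (fun p v => p ++ [p.getLast?.getD 0 + v]) [0]
    let w := window.toNat
    let res := (List.range values.length).foldl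
      (fun (st : Option Int × Nat) start =>
        let cur := prefixL.getD (start + w) 0 - prefixL.getD start 0
        match st.1 with
        | none => (some cur, start)
        | some bs => if cur > bs then (some cur, start) else st)
      (none, 0)
    ((res.2 : Int), match res.1 with | none => 0 | some bs => if bs = 0 then 0 else bs)

-- ===== PORT B =====
-- Literal port of B: rolling window total, state (best_sum, best_start, cur).
def best_circular_window_start_alt (values : List Int) (window : Int) : Int × Int :=
  let L : Int := values.length
  if L ≤ 0 then (0, 0)          -- Python raises ValueError here (outside Pre_)
  else if window ≤ 0 ∨ window > L then (0, 0)   -- Python raises ValueError here (outside Pre_)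
  else
    let w := window.toNat
    let cur0 := (List.range w).foldl (fun c i => c + values.getD i 0) 0
    let res := (List.range' 1 (values.length - 1)).foldl
      (fun (st : Int × Nat × Int) start =>
        let cur := st.2.2 + values.getD ((start + w - 1) % values.length) 0
                         - values.getD (start - 1) 0
        if cur > st.1 then (cur, start, cur) else (st.1, st.2.1, cur))
      (cur0, 0, cur0)
    ((res.2.1 : Int), res.1)

-- ===== PRECONDITION & SPEC =====
-- Pre_ excludes exactly the inputs on which A raises ValueError: empty values, or window outside [1, L].
def Pre_best_circular_window_start (values : List Int) (window : Int) : Prop :=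
  values ≠ [] ∧ 1 ≤ window ∧ window ≤ values.length
instance (values : List Int) (window : Int) : Decidable (Pre_best_circular_window_start values window) := by
  unfold Pre_best_circular_window_start; infer_instance

def pvWitness_best_circular_window_start : List Int × Int := ([3, -1, 4, 1, -5], 2)

def Spec_best_circular_window_start (values : List Int) (window : Int) (out : Int × Int) : Prop := out = best_circular_window_start_alt values window
instance (values : List Int) (window : Int) (out : Int × Int) : Decidable (Spec_best_circular_window_start values window out) := by unfold Spec_best_circular_window_start; infer_instance

-- ===== CLAIM (what is proved, stated in full; the proofs are below) =====
def Claim_equal_best_circular_window_start : Prop := ∀ (values : List Int) (window : Int), Dom_best_circular_window_start values window → Pre_best_circular_window_start values window → Spec_best_circular_window_start values window (best_circular_window_start values window)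

-- ===== LEMMAS AND PROOFS =====

-- The true window sum, over the doubled list d, as a Finset sum.
def pvWSum (d : List Int) (w s : Nat) : Int := ∑ j ∈ Finset.range w, d.getD (s + j) 0

-- A's prefix table equals partial sums of the doubled list.
def pvPref (d : List Int) (acc : Int) : List Int :=
  match d with
  | [] => []
  | v :: t => (acc + v) :: pvPref t (acc + v)

lemma pvPref_foldl (d : List Int) :
    ∀ (p : List Int), p ≠ [] →
      d.foldl (fun p v => p ++ [p.getLast?.getD 0 + v]) p = p ++ pvPref d (p.getLast?.getD 0) := by
  induction d with
  | nil => intro p _; simp [pvPref]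
  | cons v t ih =>
      intro p hp
      simp only [List.foldl_cons]
      rw [ih (p ++ [p.getLast?.getD 0 + v]) (by simp)]
      simp [pvPref, List.getLast?_append]

lemma pvPref_getD (d : List Int) :
    ∀ (a : Int) (i : Nat), i < d.length → (pvPref d a).getD i 0 = a + (d.take (i + 1)).sum := by
  induction d with
  | nil => intro a i h; simp at h
  | cons v t ih =>
      intro a i h
      cases i with
      | zero => simp [pvPref]
      | succ j =>
          simp only [pvPref, List.getD_cons_succ, List.take_succ_cons, List.sum_cons]
          rw [ih (a + v) j (by simpa using h)]
          ring

-- prefixL.getD i 0 is the sum of the first i elements of d, for i ≤ |d|.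
lemma pvPrefix_sum (d : List Int) (i : Nat) (hi : i ≤ d.length) :
    (d.foldl (fun p v => p ++ [p.getLast?.getD 0 + v]) [0]).getD i 0 = (d.take i).sum := by
  rw [pvPref_foldl d [0] (by simp)]
  cases i with
  | zero => simp
  | succ j =>
      have hj : j < d.length := by omega
      simp only [List.getLast?_singleton, Option.getD_some] at *
      have := pvPref_getD d 0 j hj
      simpa using this

-- take-sum as a window sum.
lemma pvTake_sum_range (d : List Int) (n : Nat) (hn : n ≤ d.length) :
    (d.take n).sum = ∑ j ∈ Finset.range n, d.getD j 0 := by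
  induction n with
  | zero => simp
  | succ m ih =>
      have hm : m < d.length := by omega
      rw [Finset.sum_range_succ, ← ih (by omega), List.getD_eq_getElem _ _ hm]
      exact List.sum_take_succ d m hm

-- A's cur at start s equals the window sum.
lemma pvCurA_eq (d : List Int) (w s : Nat) (h : s + w ≤ d.length) :
    (d.foldl (fun p v => p ++ [p.getLast?.getD 0 + v]) [0]).getD (s + w) 0
      - (d.foldl (fun p v => p ++ [p.getLast?.getD 0 + v]) [0]).getD s 0 = pvWSum d w s := by
  rw [pvPrefix_sum d (s + w) h, pvPrefix_sum d s (by omega)]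
  rw [pvTake_sum_range d (s + w) h, pvTake_sum_range d s (by omega)]
  unfold pvWSum
  have : ∑ j ∈ Finset.range (s + w), d.getD j 0
      = ∑ j ∈ Finset.range s, d.getD j 0 + ∑ j ∈ Finset.range w, d.getD (s + j) 0 := by
    rw [Finset.sum_range_add]
  omega

-- The rolling recurrence for the window sum (w ≥ 1).
lemma pvWSum_succ (d : List Int) (w s : Nat) (hw : 1 ≤ w) :
    pvWSum d w (s + 1) = pvWSum d w s + d.getD (s + w) 0 - d.getD s 0 := by
  obtain ⟨m, rfl⟩ : ∃ m, w = m + 1 := ⟨w - 1, by omega⟩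
  unfold pvWSum
  rw [Finset.sum_range_succ, Finset.sum_range_succ']
  have h1 : ∀ j, s + 1 + j = s + (j + 1) := by intro j; omega
  simp only [h1, Nat.add_zero]
  ring

-- Indexing the doubled list: d.getD k = values.getD (k % n) for k < 2n.
lemma pvDoubled_getD (values : List Int) (k : Nat) (hk : k < 2 * values.length) :
    (values ++ values).getD k 0 = values.getD (k % values.length) 0 := by
  by_cases h : k < values.length
  · rw [Nat.mod_eq_of_lt h]
    simp [List.getD, List.getElem?_append_left h]
  · have hn : 0 < values.length := by omega
    have hk2 : k - values.length < values.length := by omega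
    rw [Nat.mod_eq_sub_mod (by omega), Nat.mod_eq_of_lt hk2]
    simp [List.getD, List.getElem?_append_right (by omega : values.length ≤ k)]

-- Step functions of the two loops (definitionally equal to the lambdas inside the ports).
def pvStepA (values : List Int) (w : Nat) (st : Option Int × Nat) (start : Nat) : Option Int × Nat :=
  let cur := ((values ++ values).foldl (fun p v => p ++ [p.getLast?.getD 0 + v]) [0]).getD (start + w) 0
           - ((values ++ values).foldl (fun p v => p ++ [p.getLast?.getD 0 + v]) [0]).getD start 0
  match st.1 with
  | none => (some cur, start)
  | some bs => if cur > bs then (some cur, start) else st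

def pvStepB (values : List Int) (w : Nat) (st : Int × Nat × Int) (start : Nat) : Int × Nat × Int :=
  let cur := st.2.2 + values.getD ((start + w - 1) % values.length) 0 - values.getD (start - 1) 0
  if cur > st.1 then (cur, start, cur) else (st.1, st.2.1, cur)

-- B's initial sum is the window sum at start 0.
lemma pvInit_sum (values : List Int) : ∀ (m : Nat), m ≤ values.length →
    (List.range m).foldl (fun c i => c + values.getD i 0) 0 = pvWSum (values ++ values) m 0 := by
  intro m
  induction m with
  | zero => intro _; simp [pvWSum]
  | succ p ih =>
      intro hm
      unfold pvWSum
      rw [List.range_succ, List.foldl_append, Finset.sum_range_succ]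
      simp only [List.foldl_cons, List.foldl_nil, Nat.zero_add]
      have h1 := ih (by omega)
      unfold pvWSum at h1
      simp only [Nat.zero_add] at h1
      rw [h1]
      congr 1
      rw [pvDoubled_getD values p (by omega), Nat.mod_eq_of_lt (by omega)]

-- The main loop invariant: A's option-state fold agrees with B's rolling fold,
-- provided B's carried cur equals the window sum at a - 1.
lemma pvLoop_eq (values : List Int) (w : Nat) (hw : 1 ≤ w) (hwn : w ≤ values.length) :
    ∀ (k a : Nat) (b : Int) (s : Nat), 1 ≤ a → a + k ≤ values.length →
      (List.range' a k).foldl (pvStepA values w) (some b, s)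
        = (some ((List.range' a k).foldl (pvStepB values w)
            (b, s, pvWSum (values ++ values) w (a - 1))).1,
           ((List.range' a k).foldl (pvStepB values w)
            (b, s, pvWSum (values ++ values) w (a - 1))).2.1) := by
  intro k
  induction k with
  | zero => intro a b s _ _; simp
  | succ p ih =>
      intro a b s ha hk
      have hlen : (values ++ values).length = values.length + values.length := by simp
      have hcurA : pvStepA values w (some b, s) a
          = (if pvWSum (values ++ values) w a > b then (some (pvWSum (values ++ values) w a), a)
             else (some b, s)) := by
        unfold pvStepA
        rw [pvCurA_eq (values ++ values) w a (by rw [hlen]; omega)]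
      have h1 : values.getD ((a + w - 1) % values.length) 0
          = (values ++ values).getD (a + w - 1) 0 :=
        (pvDoubled_getD values (a + w - 1) (by omega)).symm
      have h2 : values.getD (a - 1) 0 = (values ++ values).getD (a - 1) 0 := by
        rw [pvDoubled_getD values (a - 1) (by omega), Nat.mod_eq_of_lt (by omega)]
      have h3 := pvWSum_succ (values ++ values) w (a - 1) hw
      rw [show a - 1 + 1 = a by omega, show a - 1 + w = a + w - 1 by omega] at h3
      have hcurB : pvStepB values w (b, s, pvWSum (values ++ values) w (a - 1)) a
          = (if pvWSum (values ++ values) w a > b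
             then (pvWSum (values ++ values) w a, a, pvWSum (values ++ values) w a)
             else (b, s, pvWSum (values ++ values) w a)) := by
        unfold pvStepB
        simp only [h1, h2]
        rw [← h3]
      rw [List.range'_succ]
      simp only [List.foldl_cons, hcurA, hcurB]
      by_cases hc : pvWSum (values ++ values) w a > b
      · rw [if_pos hc, if_pos hc]
        have := ih (a + 1) (pvWSum (values ++ values) w a) a (by omega) (by omega)
        rw [show a + 1 - 1 = a by omega] at this
        exact this
      · rw [if_neg hc, if_neg hc]
        have := ih (a + 1) b s (by omega) (by omega)
        rw [show a + 1 - 1 = a by omega] at this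
        exact this

theorem pv_main (values : List Int) (window : Int)
    (hpre : Pre_best_circular_window_start values window) :
    best_circular_window_start values window = best_circular_window_start_alt values window := by
  obtain ⟨hne, hw1, hwL⟩ := hpre
  have hn : 0 < values.length := List.length_pos_iff.mpr hne
  have hg1 : ¬ ((values.length : Int) ≤ 0) := by omega
  have hg2 : ¬ (window ≤ 0 ∨ window > (values.length : Int)) := by omega
  have hA : best_circular_window_start values window
      = ((((List.range values.length).foldl (pvStepA values window.toNat) (none, 0)).2 : Int),
         match ((List.range values.length).foldl (pvStepA values window.toNat) (none, 0)).1 with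
         | none => 0
         | some bs => if bs = 0 then 0 else bs) := by
    simp only [best_circular_window_start]
    rw [if_neg hg1, if_neg hg2]
    rfl
  have hB : best_circular_window_start_alt values window
      = ((((List.range' 1 (values.length - 1)).foldl (pvStepB values window.toNat)
            ((List.range window.toNat).foldl (fun c i => c + values.getD i 0) 0, 0,
             (List.range window.toNat).foldl (fun c i => c + values.getD i 0) 0)).2.1 : Int),
         ((List.range' 1 (values.length - 1)).foldl (pvStepB values window.toNat)
            ((List.range window.toNat).foldl (fun c i => c + values.getD i 0) 0, 0,
             (List.range window.toNat).foldl (fun c i => c + values.getD i 0) 0)).1) := by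
    simp only [best_circular_window_start_alt]
    rw [if_neg hg1, if_neg hg2]
    rfl
  rw [hA, hB]
  have hw : 1 ≤ window.toNat := by omega
  have hwn : window.toNat ≤ values.length := by omega
  have hinit : (List.range window.toNat).foldl (fun c i => c + values.getD i 0) 0
      = pvWSum (values ++ values) window.toNat 0 := pvInit_sum values window.toNat hwn
  have hrange : List.range values.length = 0 :: List.range' 1 (values.length - 1) := by
    rw [List.range_eq_range', show values.length = (values.length - 1) + 1 by omega,
        List.range'_succ]
    norm_num
  rw [hrange]
  simp only [List.foldl_cons]
  have hlen : (values ++ values).length = values.length + values.length := by simp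
  have hstep0 : pvStepA values window.toNat (none, 0) 0
      = (some (pvWSum (values ++ values) window.toNat 0), 0) := by
    unfold pvStepA
    rw [pvCurA_eq (values ++ values) window.toNat 0 (by rw [hlen]; omega)]
  rw [hstep0, hinit]
  have hloop := pvLoop_eq values window.toNat hw hwn (values.length - 1) 1
      (pvWSum (values ++ values) window.toNat 0) 0 (by omega) (by omega)
  rw [show (1 : Nat) - 1 = 0 by omega] at hloop
  rw [hloop]
  by_cases h0 : ((List.range' 1 (values.length - 1)).foldl (pvStepB values window.toNat)
      (pvWSum (values ++ values) window.toNat 0, 0,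
       pvWSum (values ++ values) window.toNat 0)).1 = 0 <;>
    simp [h0]

-- ===== VERDICT (by name: the statement is the Claim_ definition above) =====
theorem best_circular_window_start_spec : Claim_equal_best_circular_window_start := by
  intro values window _ hpre
  exact pv_main values window hpre
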